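-- pv_equiv track=rewrite | github.com/jramaswami/Binary_Search_Python | lexicographically_smallest_string_of_distance_k.py | solve
-- ===== SOURCE A (Python) =====
-- def solve(n, k):
--     soln = ['a' for _ in range(k)]
--     dist = k
--     i = k - 1
--     while dist < n:
--         if n - dist > 25:
--             soln[i] = 'z'
--             dist += 25
--         else:
--             soln[i] = chr(ord('a') + (n - dist))
--             dist = n
--         i -= 1
--     return "".join(soln)
-- ===== SOURCE B (Python) =====
-- def solve(n, k):
--     diff = n - k
--     if diff <= 0:
--         return 'a' * k
--     full, rem = divmod(diff, 25)
--     return ('a' * (k - full - (1 if rem else 0))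
--             + (chr(ord('a') + rem) if rem else '')
--             + 'z' * full)
-- ===== Notes on version B (the rewrite author's own statement) =====
-- stated objective: faster
-- what changed: Replaces the backward cell-by-cell while loop with a closed form: diff = n - k is split by divmod(diff, 25) into a trailing 'z'-block, one remainder character and a leading 'a'-block, built in one shot.
-- outside the precondition, e.g. on solve(27, 1): A returns 'b', B returns 'bz'
import Mathlib
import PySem

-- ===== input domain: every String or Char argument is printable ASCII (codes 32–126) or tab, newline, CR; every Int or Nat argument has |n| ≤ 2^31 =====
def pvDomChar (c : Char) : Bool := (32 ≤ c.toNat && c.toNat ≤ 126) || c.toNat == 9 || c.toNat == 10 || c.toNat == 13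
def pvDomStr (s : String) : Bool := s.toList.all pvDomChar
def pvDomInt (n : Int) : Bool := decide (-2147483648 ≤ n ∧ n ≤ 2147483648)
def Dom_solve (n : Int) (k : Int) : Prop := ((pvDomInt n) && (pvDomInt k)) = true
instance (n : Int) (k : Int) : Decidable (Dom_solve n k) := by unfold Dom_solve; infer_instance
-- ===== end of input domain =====

-- B replaces A's backward cell-by-cell while loop with a divmod closed form
-- ('a'-block, one remainder char, 'z'-block built in one shot).

-- ===== PORT A =====
-- A's while loop; state (soln, dist, i); pySet? = Python 'soln[i] = v' including
-- negative-index wraparound; the none branches are Python's IndexError, excluded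
-- by Pre_solve (the port returns soln there, nothing is claimed about those inputs).
def solveLoop (n : Int) (soln : List Char) (dist : Int) (i : Int) : List Char :=
  if dist < n then
    if n - dist > 25 then
      match PySem.List.pySet? soln i 'z' with
      | some s => solveLoop n s (dist + 25) (i - 1)
      | none => soln
    else
      match PySem.List.pySet? soln i (Char.ofNat (97 + (n - dist)).toNat) with
      | some s => solveLoop n s n (i - 1)
      | none => soln
  else soln
termination_by (n - dist).toNat
decreasing_by all_goals omega

def solve (n : Int) (k : Int) : String :=
  let soln := List.replicate k.toNat 'a'
  String.ofList (solveLoop n soln k (k - 1))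

-- ===== PORT B =====
def solve_alt (n : Int) (k : Int) : String :=
  let diff := n - k
  if diff ≤ 0 then String.ofList (List.replicate k.toNat 'a')
  else
    let full := PySem.Int.floordiv diff 25
    let rem := PySem.Int.mod diff 25
    String.ofList (List.replicate (k - full - (if rem ≠ 0 then 1 else 0)).toNat 'a'
      ++ (if rem ≠ 0 then [Char.ofNat (97 + rem).toNat] else [])
      ++ List.replicate full.toNat 'z')

-- ===== PRECONDITION & SPEC =====
-- Pre_solve excludes (a) the inputs on which A raises IndexError (k < n with
-- k ≤ 0, or n > 51*k), and (b) the infeasible inputs 26*k < n ≤ 51*k with k ≥ 1,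
-- on which no length-k string of char-distance n exists at all, so no value is
-- specifiable: A returns an accidental negative-index-wraparound string there
-- (e.g. "b" for (27, 1)) and B its arithmetic closed form ("bz").
def Pre_solve (n : Int) (k : Int) : Prop := n ≤ k ∨ (1 ≤ k ∧ n ≤ 26 * k)
instance (n : Int) (k : Int) : Decidable (Pre_solve n k) := by unfold Pre_solve; infer_instance
def pvWitness_solve : Int × Int := (10, 3)

def Spec_solve (n : Int) (k : Int) (out : String) : Prop := out = solve_alt n k
instance (n : Int) (k : Int) (out : String) : Decidable (Spec_solve n k out) := by unfold Spec_solve; infer_instance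

-- ===== CLAIM (what is proved, stated in full; the proofs are below) =====
def Claim_equal_solve : Prop := ∀ (n : Int) (k : Int), Dom_solve n k → Pre_solve n k → Spec_solve n k (solve n k)

-- ===== LEMMAS AND PROOFS =====

-- Python 'lst[p-1] = v' on replicate p a ++ zs replaces the cell before zs.
theorem set_replicate_append {α : Type} (p : Nat) (a v : α) (zs : List α) (hp : 1 ≤ p) :
    (List.replicate p a ++ zs).set (p - 1) v = List.replicate (p - 1) a ++ v :: zs := by
  obtain ⟨q, rfl⟩ : ∃ q, p = q + 1 := ⟨p - 1, by omega⟩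
  rw [List.replicate_succ', List.append_assoc, List.set_append]
  simp

theorem pySet_replicate (p : Nat) (v : Char) (zs : List Char) (hp : 1 ≤ p) :
    PySem.List.pySet? (List.replicate p 'a' ++ zs) ((p : Int) - 1) v =
      some (List.replicate (p - 1) 'a' ++ v :: zs) := by
  rw [show ((p : Int) - 1) = ((p - 1 : Nat) : Int) by omega,
      PySem.List.pySet?_natCast _ (p - 1) v (by simp; omega),
      set_replicate_append p 'a' v zs hp]

-- loop characterisation: with d = n - dist remaining and d ≤ 25*p (no wraparound),
-- A's loop produces exactly B's closed form.
theorem solveLoop_closed (n : Int) (d : Nat) : ∀ (p : Nat) (zs : List Char) (dist : Int),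
    (n - dist).toNat = d → 1 ≤ d → d ≤ 25 * p →
    solveLoop n (List.replicate p 'a' ++ zs) dist ((p : Int) - 1) =
      List.replicate (p - d / 25 - (if d % 25 = 0 then 0 else 1)) 'a'
        ++ (if d % 25 = 0 then [] else [Char.ofNat (97 + d % 25)])
        ++ List.replicate (d / 25) 'z' ++ zs := by
  induction d using Nat.strong_induction_on with
  | _ d IH =>
    intro p zs dist hd h1 h2
    have hp : 1 ≤ p := by omega
    have hdist : dist < n := by omega
    rw [solveLoop, if_pos hdist]
    by_cases hbig : n - dist > 25
    · rw [if_pos hbig, pySet_replicate p 'z' zs hp]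
      simp only []
      rw [show ((p : Int) - 1 - 1) = ((p - 1 : Nat) : Int) - 1 by omega]
      rw [IH (d - 25) (by omega) (p - 1) ('z' :: zs) (dist + 25) (by omega) (by omega) (by omega)]
      have hm : (d - 25) % 25 = d % 25 := by omega
      rw [hm]
      generalize (if d % 25 = 0 then (0:Nat) else 1) = e
      generalize (if d % 25 = 0 then ([] : List Char) else [Char.ofNat (97 + d % 25)]) = opt
      have hf : d / 25 = (d - 25) / 25 + 1 := by omega
      rw [hf, show p - ((d - 25) / 25 + 1) - e = p - 1 - (d - 25) / 25 - e by omega]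
      simp [List.replicate_succ', List.append_assoc]
    · rw [if_neg hbig, pySet_replicate p _ zs hp]
      simp only []
      rw [solveLoop, if_neg (by omega)]
      have hd25 : d ≤ 25 := by omega
      by_cases hr : d % 25 = 0
      · have h25 : d = 25 := by omega
        subst h25
        have hc : Char.ofNat (97 + (n - dist)).toNat = 'z' := by
          have : n - dist = 25 := by omega
          rw [this]; decide
        rw [hc]
        norm_num
      · have hc : Char.ofNat (97 + (n - dist)).toNat = Char.ofNat (97 + d % 25) := by
          have hnd : n - dist = (d : Int) := by omega
          rw [hnd]
          congr 1
          omega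
        rw [hc]
        have h0 : d / 25 = 0 := by omega
        rw [h0]
        simp [hr]

-- floordiv/mod of the positive Int diff are the Nat div/mod of its toNat
theorem floordiv_toNat (a : Int) (h : 0 < a) :
    PySem.Int.floordiv a 25 = ((a.toNat / 25 : Nat) : Int) := by
  rw [PySem.Int.floordiv_eq_ediv_of_pos (by omega)]
  omega

theorem mod_toNat (a : Int) (h : 0 < a) :
    PySem.Int.mod a 25 = ((a.toNat % 25 : Nat) : Int) := by
  rw [PySem.Int.mod_eq_emod_of_pos (by omega)]
  omega

-- B's branch, with the Int-cast tests turned into Nat tests on d = (n-k).toNat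
theorem alt_closed (n k : Int) (hlt : ¬ (n - k ≤ 0)) :
    solve_alt n k = String.ofList
      (List.replicate ((k - (((n - k).toNat / 25 : Nat) : Int)
            - (if (n - k).toNat % 25 = 0 then 0 else 1)).toNat) 'a'
        ++ (if (n - k).toNat % 25 = 0 then []
            else [Char.ofNat (97 + (n - k).toNat % 25)])
        ++ List.replicate ((n - k).toNat / 25) 'z') := by
  unfold solve_alt
  simp only []
  rw [if_neg hlt, floordiv_toNat _ (by omega), mod_toNat _ (by omega)]
  by_cases hr : (n - k).toNat % 25 = 0
  · have hc : ¬ ((((n - k).toNat % 25 : Nat) : Int) ≠ 0) := by omega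
    rw [if_neg hc, if_neg hc, if_pos hr, if_pos hr, Int.toNat_natCast]
  · have hc : (((n - k).toNat % 25 : Nat) : Int) ≠ 0 := by omega
    rw [if_pos hc, if_pos hc, if_neg hr, if_neg hr, Int.toNat_natCast,
        show Char.ofNat ((97 + (((n - k).toNat % 25 : Nat) : Int)).toNat)
            = Char.ofNat (97 + (n - k).toNat % 25) from by congr 1]

-- ===== VERDICT (by name: the statement is the Claim_ definition above) =====
theorem solve_spec : Claim_equal_solve := by
  intro n k _ hpre
  unfold Pre_solve at hpre
  show solve n k = solve_alt n k
  unfold solve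
  simp only []
  by_cases hnk : n - k ≤ 0
  · unfold solve_alt
    simp only []
    rw [if_pos hnk, solveLoop, if_neg (by omega)]
  · have hk1 : 1 ≤ k := by omega
    have h26 : n ≤ 26 * k := by omega
    have hstep : solveLoop n (List.replicate k.toNat 'a') k (k - 1) =
        List.replicate (k.toNat - (n - k).toNat / 25
            - (if (n - k).toNat % 25 = 0 then 0 else 1)) 'a'
          ++ (if (n - k).toNat % 25 = 0 then []
              else [Char.ofNat (97 + (n - k).toNat % 25)])
          ++ List.replicate ((n - k).toNat / 25) 'z' ++ [] := by
      rw [← List.append_nil (List.replicate k.toNat 'a'),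
          show (k - 1 : Int) = ((k.toNat : Int) - 1) by omega]
      exact solveLoop_closed n (n - k).toNat k.toNat [] k (by omega) (by omega) (by omega)
    rw [hstep, alt_closed n k hnk]
    refine congrArg String.ofList ?_
    rw [List.append_nil]
    have hcnt : k.toNat - (n - k).toNat / 25 - (if (n - k).toNat % 25 = 0 then 0 else 1)
        = (k - (((n - k).toNat / 25 : Nat) : Int)
            - (if (n - k).toNat % 25 = 0 then (0 : Int) else 1)).toNat := by
      by_cases hr : (n - k).toNat % 25 = 0 <;> simp [hr] <;> omega
    rw [hcnt]
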